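-- pv_equiv track=rewrite | github.com/mmroch4/university | introduction-to-programming/exercises/30/index.py | largest_sequence
-- ===== SOURCE A (Python) =====
-- def largest_sequence(num):
--   s = str(num)
--
--   m = 1
--   current = 1
--
--   for i in range(1, len(s)):
--     if int(s[i - 1]) < int(s[i]):
--       current += 1
--     else:
--       current = 1
--
--     m = max(current, m)
--
--   return m
-- ===== SOURCE B (Python) =====
-- def largest_sequence(num):
--   digits = [int(c) for c in str(num)]
--   inc = [digits[i - 1] < digits[i] for i in range(1, len(digits))]
--   best = 0
--   i = 0
--   n = len(inc)
--   while i < n: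
--     if inc[i]:
--       j = i
--       while j < n and inc[j]:
--         j += 1
--       if j - i > best:
--         best = j - i
--       i = j
--     else:
--       i += 1
--   return best + 1
-- ===== Notes on version B (the rewrite author's own statement) =====
-- stated objective: alternative
-- what changed: A fuses counting and maximising into one running-counter loop over string indices; B first builds the boolean adjacency table of consecutive digit increases and then scans it for the longest run of True with a two-pointer run scan, returning that run length + 1.
import Mathlib
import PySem

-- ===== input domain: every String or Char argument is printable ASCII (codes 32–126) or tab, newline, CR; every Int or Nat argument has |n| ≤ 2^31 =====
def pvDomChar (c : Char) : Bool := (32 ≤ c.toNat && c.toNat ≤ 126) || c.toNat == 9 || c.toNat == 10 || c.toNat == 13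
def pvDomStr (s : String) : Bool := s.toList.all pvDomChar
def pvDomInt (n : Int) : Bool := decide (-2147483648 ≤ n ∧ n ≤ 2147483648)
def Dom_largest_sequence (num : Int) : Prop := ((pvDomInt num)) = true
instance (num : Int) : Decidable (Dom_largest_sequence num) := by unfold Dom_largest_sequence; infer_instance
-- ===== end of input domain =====

-- B replaces A's fused running-counter loop by a build-the-adjacency-table-then-scan-runs
-- decomposition (objective: alternative; same linear cost). Equal return values for all num ≥ 0.

-- int(c) for a single character: exact on digit characters '0'..'9'; Pre_ (num ≥ 0) guarantees
-- every character of str(num) is a digit, so this is exact on the admitted domain.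
def digitVal (c : Char) : Int := (c.toNat : Int) - 48

-- ===== PORT A =====
def largest_sequence (num : Int) : Int :=
  let s := PySem.Int.toStr num
  let cs := s.toList
  let r := (PySem.List.pyRange 1 (PySem.Str.len s) 1).foldl
    (fun (st : Int × Int) (i : Int) =>
      let current : Int :=
        if digitVal (PySem.List.pyGetD cs (i - 1) ' ') < digitVal (PySem.List.pyGetD cs i ' ')
        then st.1 + 1 else 1
      (current, max current st.2))
    (1, 1)
  r.2

-- ===== PORT B =====
-- longest run of consecutive `true`s in the adjacency table (B's inner/outer while-loop scan:
-- takeWhile = the inner `while j < n and inc[j]` advance, dropWhile = resuming at i = j)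
def longestRunB : List Bool → Int
  | [] => 0
  | false :: r => longestRunB r
  | true :: r =>
      max (((r.takeWhile (· = true)).length : Int) + 1)
          (longestRunB (r.dropWhile (· = true)))
  termination_by l => l.length
  decreasing_by
    · simp
    · have := List.length_dropWhile_le (p := fun x => decide (x = true)) (l := r)
      simp only [List.length_cons]; omega

def largest_sequence_alt (num : Int) : Int :=
  let ds := (PySem.Int.toStr num).toList.map digitVal
  let inc := List.zipWith (fun a b => decide (a < b)) ds ds.tail
  longestRunB inc + 1

-- ===== PRECONDITION & SPEC =====
-- Pre_ excludes exactly num < 0, where both A and B raise ValueError (int('-') on the sign char).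
def Pre_largest_sequence (num : Int) : Prop := 0 ≤ num
instance (num : Int) : Decidable (Pre_largest_sequence num) := by unfold Pre_largest_sequence; infer_instance
def pvWitness_largest_sequence : Int := 1234

def Spec_largest_sequence (num : Int) (out : Int) : Prop := out = largest_sequence_alt num
instance (num : Int) (out : Int) : Decidable (Spec_largest_sequence num out) := by unfold Spec_largest_sequence; infer_instance

-- ===== CLAIM (what is proved, stated in full; the proofs are below) =====
def Claim_equal_largest_sequence : Prop := ∀ (num : Int), Dom_largest_sequence num → Pre_largest_sequence num → Spec_largest_sequence num (largest_sequence num)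

-- ===== LEMMAS AND PROOFS =====

theorem longestRunB_nonneg (l : List Bool) : 0 ≤ longestRunB l := by
  induction l using longestRunB.induct with
  | case1 => simp [longestRunB]
  | case2 r ih => simpa [longestRunB] using ih
  | case3 r ih =>
      simp only [longestRunB]
      have : (0:Int) ≤ ((r.takeWhile (· = true)).length : Int) + 1 := by positivity
      omega

-- split a boolean list at its leading true-run
theorem longestRunB_split (l : List Bool) :
    longestRunB l = max ((l.takeWhile (· = true)).length : Int)
      (longestRunB (l.dropWhile (· = true))) := by
  match l with
  | [] => simp [longestRunB]
  | false :: r =>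
      have h := longestRunB_nonneg r
      simp [longestRunB]
      omega
  | true :: r =>
      simp [longestRunB]

-- A's loop body on one adjacency bool
def astep (st : Int × Int) (b : Bool) : Int × Int :=
  let current : Int := if b then st.1 + 1 else 1
  (current, max current st.2)

-- invariant characterisation of A's fold
theorem foldl_astep_eq (l : List Bool) : ∀ (cur m : Int), 1 ≤ cur → cur ≤ m →
    (l.foldl astep (cur, m)).2 =
      max m (max (cur + ((l.takeWhile (· = true)).length : Int))
        (1 + longestRunB (l.dropWhile (· = true)))) := by
  induction l with
  | nil =>
      intro cur m h1 h2
      simp [longestRunB]; omega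
  | cons b r ih =>
      intro cur m h1 h2
      cases b with
      | true =>
          have h := ih (cur + 1) (max (cur + 1) m) (by omega) (le_max_left _ _)
          simp only [List.foldl_cons, astep, reduceIte]
          rw [h]
          simp only [List.takeWhile_cons, List.dropWhile_cons, decide_true, if_true,
            List.length_cons]
          push_cast
          omega
      | false =>
          have h := ih 1 (max 1 m) le_rfl (le_max_left _ _)
          simp only [List.foldl_cons, astep, Bool.false_eq_true, if_false]
          rw [h]
          simp only [List.takeWhile_cons, List.dropWhile_cons, decide_false,
            Bool.false_eq_true, if_false, List.length_nil]
          have hs := longestRunB_split r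
          have hn : (0:Int) ≤ ((r.takeWhile (· = true)).length : Int) := by positivity
          have hn2 := longestRunB_nonneg (r.dropWhile (· = true))
          have hfr : longestRunB (false :: r) = longestRunB r := by simp [longestRunB]
          rw [hfr]
          omega

-- A's fold over the whole adjacency table computes 1 + longest true-run
theorem foldl_astep_main (l : List Bool) :
    (l.foldl astep (1, 1)).2 = longestRunB l + 1 := by
  rw [foldl_astep_eq l 1 1 le_rfl le_rfl, longestRunB_split l]
  have hn : (0:Int) ≤ ((l.takeWhile (· = true)).length : Int) := by positivity
  have hn2 := longestRunB_nonneg (l.dropWhile (· = true))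
  omega

-- the adjacent-pairs table read off by index equals zip with the tail
theorem range_pairs_eq_zip_tail {α : Type} (cs : List α) (d : α) :
    (List.range (cs.length - 1)).map (fun k => (cs.getD k d, cs.getD (k + 1) d)) =
      cs.zip cs.tail := by
  apply List.ext_getElem
  · simp [List.length_zip]
  · intro i h1 h2
    simp only [List.getElem_map, List.getElem_range, List.getElem_zip]
    have hlen : i < cs.length - 1 := by simpa using h1
    have htail : cs.tail.length = cs.length - 1 := by simp
    rw [List.getD_eq_getElem cs d (by omega), List.getD_eq_getElem cs d (by omega)]
    congr 1
    rw [List.getElem_tail]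

theorem inc_eq {α β : Type} (cs : List α) (f : α → β) (g : β → β → Bool) :
    (cs.zip cs.tail).map (fun p => g (f p.1) (f p.2)) =
      List.zipWith (fun a b => g a b) (cs.map f) (cs.map f).tail := by
  induction cs with
  | nil => simp
  | cons x r ih =>
      cases r with
      | nil => simp
      | cons y t =>
          simp only [List.zip, List.tail_cons, List.zipWith_cons_cons, List.map_cons]
          exact congrArg _ (by simpa [List.zip] using ih)

-- shift an index loop 'for i in range(1, n)' to a Nat-indexed fold
theorem foldl_shift (m : Nat) (F : Int × Int → Int → Int × Int) (G : Int × Int → Nat → Int × Int)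
    (init : Int × Int) (h : ∀ (st : Int × Int) (k : Nat), F st (1 + (k : Int)) = G st k) :
    (List.map (fun k : Nat => (1 : Int) + (k : Int)) (List.range m)).foldl F init =
      (List.range m).foldl G init := by
  rw [List.foldl_map]
  exact List.foldl_ext _ G init (fun st k _ => h st k)

-- ===== VERDICT (by name: the statement is the Claim_ definition above) =====
theorem largest_sequence_spec : Claim_equal_largest_sequence := by
  intro num _ _
  unfold Spec_largest_sequence largest_sequence largest_sequence_alt
  simp only [PySem.Str.len_eq]
  generalize (PySem.Int.toStr num).toList = cs
  have htn : (((cs.length : Nat) : Int) - 1).toNat = cs.length - 1 := by omega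
  have hstep : ∀ (st : Int × Int) (k : Nat),
      (fun (st : Int × Int) (i : Int) =>
        let current : Int :=
          if digitVal (PySem.List.pyGetD cs (i - 1) ' ') < digitVal (PySem.List.pyGetD cs i ' ')
          then st.1 + 1 else 1
        (current, max current st.2)) st (1 + (k : Int)) =
      astep st (decide (digitVal (cs.getD k ' ') < digitVal (cs.getD (k + 1) ' '))) := by
    intro st k
    have h2 : (1 : Int) + (k : Int) = (((k + 1 : Nat)) : Int) := by omega
    simp only [h2, PySem.List.pyGetD_natCast, astep]
    by_cases hlt : digitVal (cs.getD k ' ') < digitVal (cs.getD (k + 1) ' ') <;> simp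
  rw [PySem.List.pyRange_one, htn, foldl_shift _ _ _ _ hstep]
  have hmap : (List.range (cs.length - 1)).foldl
      (fun st k => astep st (decide (digitVal (cs.getD k ' ') < digitVal (cs.getD (k + 1) ' '))))
      (1, 1) =
      ((List.range (cs.length - 1)).map (fun k => (cs.getD k ' ', cs.getD (k + 1) ' '))).foldl
        (fun st p => astep st (decide (digitVal p.1 < digitVal p.2))) (1, 1) := by
    rw [List.foldl_map]
  rw [hmap, range_pairs_eq_zip_tail cs ' ',
      ← List.foldl_map (f := fun (p : Char × Char) => decide (digitVal p.1 < digitVal p.2))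
        (g := astep),
      inc_eq cs digitVal (fun a b => decide (a < b))]
  exact foldl_astep_main _
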